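-- pv_equiv track=rewrite | github.com/FiliaLux/numeros_romanos | calculatum/roman_numbers.py | in_strike
-- ===== SOURCE A (Python) =====
-- def in_strike(haystack:str,needle:str,strike:int):
--     count = 0
--     if len(haystack) >= strike:
--         for item in haystack:
--             if item == needle:
--                 count += 1
--                 if count == strike:
--                     break
--             else:
--                 count = 0
--     else:
--         count = 0
--
--     return count >= strike
-- ===== SOURCE B (Python) =====
-- def in_strike(haystack, needle, strike):
--     return strike <= 0 or (len(needle) == 1 and needle * strike in haystack)
-- ===== Notes on version B (the rewrite author's own statement) =====
-- stated objective: simpler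
-- what changed: Replaced A's per-character counter loop with reset and early break by a one-line reduction: strike <= 0 or (len(needle) == 1 and needle * strike in haystack), delegating the run search to the built-in substring test.
import Mathlib
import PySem

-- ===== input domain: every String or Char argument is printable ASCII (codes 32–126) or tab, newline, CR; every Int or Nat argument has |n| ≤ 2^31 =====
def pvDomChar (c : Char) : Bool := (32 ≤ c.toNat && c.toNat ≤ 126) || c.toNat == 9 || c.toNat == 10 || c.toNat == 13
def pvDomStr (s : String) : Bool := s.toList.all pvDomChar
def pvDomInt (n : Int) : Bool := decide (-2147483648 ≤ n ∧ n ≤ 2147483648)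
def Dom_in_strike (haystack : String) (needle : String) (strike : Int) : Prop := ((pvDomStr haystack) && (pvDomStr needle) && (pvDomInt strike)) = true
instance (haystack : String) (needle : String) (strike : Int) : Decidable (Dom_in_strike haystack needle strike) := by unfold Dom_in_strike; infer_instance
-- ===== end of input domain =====

-- B replaces A's counter loop with early break by a single substring test
-- (needle * strike in haystack); objective: simpler.

-- ===== PORT A =====
-- A's for-loop over haystack: state is `count`; a matching char increments it
-- (breaking when it reaches strike), a non-matching char resets it to 0.
def inStrikeLoop (needle : List Char) (strike : Int) : List Char → Int → Int
  | [], count => count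
  | c :: rest, count =>
    if [c] = needle then
      if count + 1 = strike then count + 1
      else inStrikeLoop needle strike rest (count + 1)
    else inStrikeLoop needle strike rest 0

def in_strike (haystack : String) (needle : String) (strike : Int) : Bool :=
  let count : Int :=
    if strike ≤ (haystack.toList.length : Int) then
      inStrikeLoop needle.toList strike haystack.toList 0
    else 0
  decide (strike ≤ count)

-- ===== PORT B =====
-- Source B: return strike <= 0 or (len(needle) == 1 and needle * strike in haystack)
def in_strike_alt (haystack : String) (needle : String) (strike : Int) : Bool :=
  decide (strike ≤ 0) ||
    (decide (needle.toList.length = 1) &&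
      PySem.Chars.isIn (PySem.List.pyRepeat needle.toList strike) haystack.toList)

-- ===== PRECONDITION & SPEC =====
def Spec_in_strike (haystack : String) (needle : String) (strike : Int) (out : Bool) : Prop := out = in_strike_alt haystack needle strike
instance (haystack : String) (needle : String) (strike : Int) (out : Bool) : Decidable (Spec_in_strike haystack needle strike out) := by unfold Spec_in_strike; infer_instance

-- ===== CLAIM (what is proved, stated in full; the proofs are below) =====
def Claim_equal_in_strike : Prop := ∀ (haystack : String) (needle : String) (strike : Int), Dom_in_strike haystack needle strike → Spec_in_strike haystack needle strike (in_strike haystack needle strike)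

-- ===== LEMMAS AND PROOFS =====

-- The loop never produces a negative count.
theorem inStrikeLoop_nonneg (n : List Char) (s : Int) (cs : List Char) (c : Int)
    (hc : 0 ≤ c) : 0 ≤ inStrikeLoop n s cs c := by
  induction cs generalizing c with
  | nil => simpa [inStrikeLoop] using hc
  | cons x r ih =>
    simp only [inStrikeLoop]
    split_ifs with h1 h2
    · omega
    · exact ih (c + 1) (by omega)
    · exact ih 0 (by omega)

-- If no single character equals the needle, the loop starting at 0 returns 0.
theorem inStrikeLoop_nomatch (n : List Char) (s : Int) (cs : List Char)
    (h : ∀ c : Char, [c] ≠ n) : inStrikeLoop n s cs 0 = 0 := by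
  induction cs with
  | nil => rfl
  | cons x r ih => simp [inStrikeLoop, h x, ih]

-- replicate m a is a prefix of replicate n a when m ≤ n
theorem replicate_prefix_replicate (a : Char) {m n : Nat} (h : m ≤ n) :
    List.replicate m a <+: List.replicate n a := by
  have he : List.replicate n a = List.replicate m a ++ List.replicate (n - m) a := by
    rw [← List.replicate_add]; congr 1; omega
  rw [he]; exact List.prefix_append _ _

-- Main invariant for a single-char needle [a]: with 0 ≤ c < s the loop reaches
-- strike iff the pending run completes as a prefix or a fresh full run occurs later.
theorem inStrikeLoop_run (a : Char) (s : Int) (cs : List Char) (c : Int)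
    (hc : 0 ≤ c) (hcs : c < s) :
    (s ≤ inStrikeLoop [a] s cs c ↔
      (List.replicate (s - c).toNat a <+: cs ∨
        ∃ j, 0 < j ∧ List.replicate s.toNat a <+: cs.drop j)) := by
  induction cs generalizing c with
  | nil =>
    simp only [inStrikeLoop, List.prefix_nil, List.drop_nil,
      List.replicate_eq_nil_iff]
    constructor
    · omega
    · rintro (h | ⟨j, _, h⟩) <;> omega
  | cons x r ih =>
    simp only [inStrikeLoop]
    by_cases hx : [x] = [a]
    · have hxa : x = a := by simpa using hx
      subst hxa
      rw [if_pos rfl]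
      by_cases hdone : c + 1 = s
      · rw [if_pos hdone]
        constructor
        · intro _
          left
          have : (s - c).toNat = 1 := by omega
          simp [this]
        · intro _; omega
      · rw [if_neg hdone]
        rw [ih (c + 1) (by omega) (by omega)]
        have hrep : List.replicate (s - c).toNat x
            = x :: List.replicate (s - (c + 1)).toNat x := by
          have : (s - c).toNat = (s - (c + 1)).toNat + 1 := by omega
          simp [this, List.replicate_succ]
        constructor
        · rintro (h | ⟨j, hj, h⟩)
          · left; rw [hrep]; exact List.cons_prefix_cons.mpr ⟨rfl, h⟩
          · right; exact ⟨j + 1, by omega, by simpa using h⟩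
        · rintro (h | ⟨j, hj, h⟩)
          · rw [hrep] at h
            exact Or.inl (List.cons_prefix_cons.mp h).2
          · rcases Nat.eq_or_lt_of_le hj with hj1 | hj1
            · -- j = 1: a full run is a prefix of r; the shorter pending run is too
              left
              have h' : List.replicate s.toNat x <+: r := by
                simpa [← hj1] using h
              exact (replicate_prefix_replicate x (by omega)).trans h'
            · right
              refine ⟨j - 1, by omega, ?_⟩
              have hjj : r.drop (j - 1) = (x :: r).drop j := by
                have hj2 : j = (j - 1) + 1 := by omega
                rw [hj2]; rfl
              rw [hjj]; exact h
    · rw [if_neg hx]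
      rw [ih 0 (by omega) (by omega)]
      have hxa : x ≠ a := fun h => hx (by rw [h])
      have hs1 : (s - c).toNat = ((s - c).toNat - 1) + 1 := by omega
      constructor
      · rintro (h | ⟨j, hj, h⟩)
        · right
          refine ⟨1, by omega, ?_⟩
          have : s.toNat = (s - 0).toNat := by omega
          rw [this]; simpa using h
        · exact Or.inr ⟨j + 1, by omega, by simpa using h⟩
      · rintro (h | ⟨j, hj, h⟩)
        · exfalso
          rw [hs1, List.replicate_succ] at h
          exact hxa (List.cons_prefix_cons.mp h).1.symm
        · rcases Nat.eq_or_lt_of_le hj with hj1 | hj1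
          · left
            have : (s - 0).toNat = s.toNat := by omega
            rw [this]
            simpa [← hj1] using h
          · right
            refine ⟨j - 1, by omega, ?_⟩
            have hjj : r.drop (j - 1) = (x :: r).drop j := by
              have hj2 : j = (j - 1) + 1 := by omega
              rw [hj2]; rfl
            rw [hjj]; exact h

theorem in_strike_eq_alt (haystack needle : String) (strike : Int) :
    in_strike haystack needle strike = in_strike_alt haystack needle strike := by
  unfold in_strike in_strike_alt
  by_cases hs0 : strike ≤ 0
  · -- A: guard holds (length ≥ 0 ≥ strike), loop result ≥ 0 ≥ strike → true; B: true
    have hguard : strike ≤ (haystack.toList.length : Int) := le_trans hs0 (by positivity)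
    simp only [if_pos hguard]
    have := inStrikeLoop_nonneg needle.toList strike haystack.toList 0 le_rfl
    have h2 : strike ≤ inStrikeLoop needle.toList strike haystack.toList 0 := by omega
    simp [hs0, h2]
  · push_neg at hs0
    by_cases hlen : needle.toList.length = 1
    · obtain ⟨a, ha⟩ : ∃ a, needle.toList = [a] := by
        cases hn : needle.toList with
        | nil => simp [hn] at hlen
        | cons x t =>
          cases t with
          | nil => exact ⟨x, rfl⟩
          | cons y u => simp [hn] at hlen
      rw [ha, PySem.List.pyRepeat_singleton]
      by_cases hguard : strike ≤ (haystack.toList.length : Int)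
      · rw [if_pos hguard]
        have hrun := inStrikeLoop_run a strike haystack.toList 0 le_rfl hs0
        by_cases hin : PySem.Chars.isIn (List.replicate strike.toNat a) haystack.toList = true
        · rw [hin]
          obtain ⟨j, hj⟩ := (PySem.Chars.exists_prefix_drop_iff_isIn (List.replicate strike.toNat a)
              haystack.toList).mpr hin
          have hyes : strike ≤ inStrikeLoop [a] strike haystack.toList 0 := by
            rw [hrun]
            cases Nat.eq_zero_or_pos j with
            | inl h0 =>
              left
              subst h0
              have : (strike - 0).toNat = strike.toNat := by omega
              rw [this]
              simpa using hj
            | inr hpos => exact Or.inr ⟨j, hpos, hj⟩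
          simp [hyes]
        · have hinf : PySem.Chars.isIn (List.replicate strike.toNat a) haystack.toList = false := by
            simpa using hin
          rw [hinf]
          have hnex := (not_iff_not.mpr
            (PySem.Chars.exists_prefix_drop_iff_isIn (List.replicate strike.toNat a)
              haystack.toList)).mpr (by simp [hinf])
          push_neg at hnex
          have hnot : ¬ strike ≤ inStrikeLoop [a] strike haystack.toList 0 := by
            rw [hrun]
            rintro (h | ⟨j, _, h⟩)
            · exact hnex 0 (by simpa using h)
            · exact hnex j h
          simp [hnot, (show ¬ strike ≤ (0 : Int) by omega)]
      · rw [if_neg hguard]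
        push_neg at hguard
        have hin : PySem.Chars.isIn (List.replicate strike.toNat a) haystack.toList = false := by
          rw [PySem.Chars.isIn_eq_false_iff]
          intro hinf
          have := hinf.length_le
          simp only [List.length_replicate] at this
          omega
        simp [hin, (show ¬ strike ≤ (0 : Int) by omega)]
    · -- multi-char (or empty) needle: A never matches, B's length guard fails
      have hnm : ∀ c : Char, [c] ≠ needle.toList := by
        intro c h
        apply hlen
        rw [← h]
        rfl
      have hloop := inStrikeLoop_nomatch needle.toList strike
      have hlen' : ¬ needle.length = 1 := by simpa using hlen
      by_cases hguard : strike ≤ (haystack.toList.length : Int)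
      · rw [if_pos hguard, hloop haystack.toList hnm]
        simp [hlen', (show ¬ strike ≤ (0 : Int) by omega)]
      · rw [if_neg hguard]
        simp [hlen', (show ¬ strike ≤ (0 : Int) by omega)]

-- ===== VERDICT (by name: the statement is the Claim_ definition above) =====
theorem in_strike_spec : Claim_equal_in_strike := by
  intro haystack needle strike _
  unfold Spec_in_strike
  exact in_strike_eq_alt haystack needle strike
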